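-- pv_equiv track=rewrite | github.com/hwinners/AgenticAIAdvisor | backend/core/pdf_parser.py | _explode_row
-- ===== SOURCE A (Python) =====
-- from typing import List, Dict
--
-- def _explode_row(row: List[str]) -> List[List[str]]:
--     """
--     Takes a table row where cells might contain newlines (multiple courses stacked)
--     and splits them into multiple single-line rows.
--     Example: ['2205\n2205', 'COP2220\nMAC2311'] -> [['2205', 'COP2220'], ['2205', 'MAC2311']]
--     """
--     # Split every cell by newline
--     lines_by_cell = [str(c).split('\n') if c else [] for c in row]
--     # Find the maximum number of lines in this row
--     max_lines = max((len(l) for l in lines_by_cell), default=0)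
--
--     new_rows = []
--     for i in range(max_lines):
--         new_row = []
--         for lines in lines_by_cell:
--             if i < len(lines):
--                 # Take the i-th line of this cell
--                 new_row.append(lines[i].strip())
--             else:
--                 # If this cell is shorter than others, pad with empty string
--                 new_row.append("")
--         new_rows.append(new_row)
--     return new_rows
-- ===== SOURCE B (Python) =====
-- from typing import List
--
-- def _explode_row(row: List[str]) -> List[List[str]]:
--     # Incremental column-major build: process one cell at a time, widening an
--     # accumulated list of output rows; no max computation, no index loop over rows.
--     rows: List[List[str]] = []
--     ncells = 0
--     for c in row:
--         lines = [x.strip() for x in str(c).split('\n')] if c else []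
--         # extend every existing output row with this cell's line (or padding)
--         for j, r in enumerate(rows):
--             r.append(lines[j] if j < len(lines) else "")
--         # this cell has more lines than any cell so far: open new output rows
--         for j in range(len(rows), len(lines)):
--             rows.append([""] * ncells + [lines[j]])
--         ncells += 1
--     return rows
-- ===== Notes on version B (the rewrite author's own statement) =====
-- stated objective: alternative
-- what changed: Replaced A's two-stage max-lines computation plus index-driven transpose loop with a single incremental pass over the cells that widens an accumulated list of partial output rows (appending each cell's line or padding to every existing row and opening new padded rows when a cell has more lines), so no maximum and no row-index range are ever computed.
import Mathlib
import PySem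

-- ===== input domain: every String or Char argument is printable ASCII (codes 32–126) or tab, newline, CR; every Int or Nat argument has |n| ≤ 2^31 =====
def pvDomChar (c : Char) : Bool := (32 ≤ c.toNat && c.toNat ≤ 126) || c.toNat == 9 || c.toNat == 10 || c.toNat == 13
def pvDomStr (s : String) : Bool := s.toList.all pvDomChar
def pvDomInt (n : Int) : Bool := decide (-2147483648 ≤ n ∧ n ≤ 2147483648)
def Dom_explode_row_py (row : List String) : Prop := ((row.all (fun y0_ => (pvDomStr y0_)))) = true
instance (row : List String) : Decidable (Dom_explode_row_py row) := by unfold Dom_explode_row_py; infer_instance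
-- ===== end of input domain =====

-- B replaces A's max-lines + index-transpose with one incremental pass over the
-- cells that widens an accumulated list of partial output rows (alternative decomposition).

-- ===== PORT A =====
-- lines_by_cell = [str(c).split('\n') if c else [] for c in row]
-- ('\n' is a nonempty separator, so split? always returns some; getD [] only unwraps it)
def pvCells (row : List String) : List (List String) :=
  row.map (fun c => if c ≠ "" then (PySem.Str.split? c "\n").getD [] else [])

def explode_row_py (row : List String) : List (List String) :=
  let lines_by_cell := pvCells row
  -- max_lines = max((len(l) for l in lines_by_cell), default=0)
  let max_lines := (lines_by_cell.map List.length).foldl Nat.max 0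
  -- for i in range(max_lines): build new_row cell by cell, pad with ""
  (List.range max_lines).map (fun i =>
    lines_by_cell.map (fun lines =>
      if i < lines.length then PySem.Str.strip (lines.getD i "") else ""))

-- ===== PORT B =====
-- lines = [x.strip() for x in str(c).split('\n')] if c else []
def pvLinesB (c : String) : List String :=
  if c ≠ "" then ((PySem.Str.split? c "\n").getD []).map PySem.Str.strip else []

-- one cell of B's loop body: widen every accumulated row, then open new rows
-- (for j, r in enumerate(rows): r.append(...)  ported with zipIdx = element/index pairs)
def pvStep (st : List (List String) × Nat) (c : String) : List (List String) × Nat :=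
  let lines := pvLinesB c
  let extended := st.1.zipIdx.map (fun q =>
    q.1 ++ [if q.2 < lines.length then lines.getD q.2 "" else ""])
  -- for j in range(len(rows), len(lines)): rows.append([""]*ncells + [lines[j]])
  let extra := (List.range' st.1.length (lines.length - st.1.length)).map (fun j =>
    List.replicate st.2 "" ++ [lines.getD j ""])
  (extended ++ extra, st.2 + 1)

def explode_row_py_alt (row : List String) : List (List String) :=
  (row.foldl pvStep ([], 0)).1

-- ===== PRECONDITION & SPEC =====
def Spec_explode_row_py (row : List String) (out : List (List String)) : Prop := out = explode_row_py_alt row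
instance (row : List String) (out : List (List String)) : Decidable (Spec_explode_row_py row out) := by unfold Spec_explode_row_py; infer_instance

-- ===== CLAIM (what is proved, stated in full; the proofs are below) =====
def Claim_equal_explode_row_py : Prop := ∀ (row : List String), Dom_explode_row_py row → Spec_explode_row_py row (explode_row_py row)

-- ===== LEMMAS AND PROOFS =====

-- the common "transposed grid" characterisation both ports are reduced to
def pvMlen (p : List String) : Nat := (p.map (fun c => (pvLinesB c).length)).foldl Nat.max 0

def pvGrid (p : List String) : List (List String) :=
  (List.range (pvMlen p)).map (fun i => p.map (fun c => (pvLinesB c).getD i ""))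

theorem pv_foldl_max_acc (l : List Nat) (a : Nat) :
    l.foldl Nat.max a = Nat.max a (l.foldl Nat.max 0) := by
  induction l generalizing a with
  | nil => simp
  | cons x xs ih =>
    simp only [List.foldl_cons]
    rw [ih (Nat.max a x), ih (Nat.max 0 x)]
    simp [Nat.max_assoc]

theorem pv_le_foldl_max (l : List Nat) (x : Nat) (hx : x ∈ l) :
    x ≤ l.foldl Nat.max 0 := by
  induction l with
  | nil => simp at hx
  | cons y ys ih =>
    simp only [List.foldl_cons]
    rw [pv_foldl_max_acc]
    rcases List.mem_cons.mp hx with h | h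
    · subst h; simp
    · exact le_trans (ih h) (Nat.le_max_right _ _)

theorem pvMlen_append (p : List String) (c : String) :
    pvMlen (p ++ [c]) = Nat.max (pvMlen p) (pvLinesB c).length := by
  simp only [pvMlen, List.map_append, List.foldl_append, List.map_cons, List.map_nil,
    List.foldl_cons, List.foldl_nil]

theorem pv_zipIdx_range_map {α : Type} (n : Nat) (f : Nat → α) :
    ((List.range n).map f).zipIdx = (List.range n).map (fun j => (f j, j)) := by
  apply List.ext_getElem
  · simp
  · intro i h1 h2
    simp [List.getElem_zipIdx]

theorem pv_range_max (M L : Nat) :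
    List.range M ++ List.range' M (L - M) = List.range (Nat.max M L) := by
  rw [List.range_eq_range', List.range_eq_range',
    show List.range' M (L - M) = List.range' (0 + M) (L - M) by rw [Nat.zero_add],
    List.range'_append_1]
  congr 1
  show M + (L - M) = max M L
  omega

theorem pvGrid_length (p : List String) : (pvGrid p).length = pvMlen p := by
  simp [pvGrid]

theorem pvGrid_append (p : List String) (c : String) :
    pvGrid (p ++ [c]) =
      (List.range (Nat.max (pvMlen p) (pvLinesB c).length)).map
        (fun i => p.map (fun c' => (pvLinesB c').getD i "") ++ [(pvLinesB c).getD i ""]) := by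
  unfold pvGrid
  rw [pvMlen_append]
  apply List.map_congr_left
  intro i _
  simp

-- B's loop state after processing p is exactly (grid of p, number of cells of p)
theorem pv_foldl_step (row : List String) :
    row.foldl pvStep ([], 0) = (pvGrid row, row.length) := by
  induction row using List.reverseRecOn with
  | nil => simp [pvGrid, pvMlen]
  | append_singleton p c ih =>
    rw [List.foldl_append, List.foldl_cons, List.foldl_nil, ih]
    unfold pvStep
    simp only
    rw [Prod.mk.injEq]
    refine ⟨?_, by simp⟩
    set lines := pvLinesB c with hl
    set M := pvMlen p with hM
    set L := lines.length with hL
    -- rewrite the extended part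
    have hext : (pvGrid p).zipIdx.map (fun q =>
        q.1 ++ [if q.2 < L then lines.getD q.2 "" else ""]) =
        (List.range M).map (fun j =>
          p.map (fun c' => (pvLinesB c').getD j "") ++ [lines.getD j ""]) := by
      unfold pvGrid
      rw [← hM, pv_zipIdx_range_map, List.map_map]
      apply List.map_congr_left
      intro j _
      simp only [Function.comp]
      congr 1
      by_cases h : j < L
      · simp [h]
      · rw [if_neg h, List.getD_eq_default _ _ (by omega)]
    -- rewrite the extra part
    have hextra : (List.range' (pvGrid p).length (L - (pvGrid p).length)).map (fun j =>
        List.replicate p.length "" ++ [lines.getD j ""]) =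
        (List.range' M (L - M)).map (fun j =>
          p.map (fun c' => (pvLinesB c').getD j "") ++ [lines.getD j ""]) := by
      rw [pvGrid_length, ← hM]
      apply List.map_congr_left
      intro j hj
      have hjM : M ≤ j := (List.mem_range'_1.mp hj).1
      congr 1
      symm
      rw [List.eq_replicate_iff]
      refine ⟨by simp, ?_⟩
      intro b hb
      rcases List.mem_map.mp hb with ⟨c', hc', rfl⟩
      rw [List.getD_eq_default]
      have : (pvLinesB c').length ≤ M := by
        apply pv_le_foldl_max
        exact List.mem_map.mpr ⟨c', hc', rfl⟩
      omega
    rw [hext, hextra, ← List.map_append, pvGrid_append, ← hM, ← hl, ← hL]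
    rw [pv_range_max]

-- A also computes the grid
theorem pv_A_grid (row : List String) : explode_row_py row = pvGrid row := by
  unfold explode_row_py pvGrid
  simp only
  have hlen : (pvCells row).map List.length = row.map (fun c => (pvLinesB c).length) := by
    unfold pvCells pvLinesB
    rw [List.map_map]
    apply List.map_congr_left
    intro c _
    by_cases h : c = "" <;> simp [h]
  have hM : ((pvCells row).map List.length).foldl Nat.max 0 = pvMlen row := by
    rw [hlen]; rfl
  rw [hM]
  apply List.map_congr_left
  intro i _
  unfold pvCells pvLinesB
  rw [List.map_map]
  apply List.map_congr_left
  intro c _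
  simp only [Function.comp]
  by_cases h : c = ""
  · simp [h]
  · simp only [h, ne_eq, not_false_eq_true, if_pos]
    set ls := (PySem.Str.split? c "\n").getD [] with hls
    by_cases hi : i < ls.length
    · rw [if_pos hi, List.getD_eq_getElem _ _ hi,
        List.getD_eq_getElem _ _ (by simpa using hi)]
      simp
    · rw [if_neg hi, List.getD_eq_default _ _ (by simpa using hi)]

-- ===== VERDICT (by name: the statement is the Claim_ definition above) =====
theorem explode_row_py_spec : Claim_equal_explode_row_py := by
  intro row _
  unfold Spec_explode_row_py explode_row_py_alt
  rw [pv_foldl_step, pv_A_grid]
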